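-- pv_equiv track=rewrite | github.com/drgnfrts/IS111 | content/week11/lab 8/q5c.py | get_words_by_count
-- ===== SOURCE A (Python) =====
-- def get_words_by_count(input_dict):
--     r_dict = {}
--     for word, num in input_dict.items():
--         if num in r_dict:
--             r_dict[num].append(word)
--         else:
--             r_dict[num] = [word]
--     return r_dict
-- ===== SOURCE B (Python) =====
-- def get_words_by_count(input_dict):
--     items = list(input_dict.items())
--     counts = list(dict.fromkeys(num for _, num in items))
--     return {num: [word for word, c in items if c == num] for num in counts}
-- ===== Notes on version B (the rewrite author's own statement) =====
-- stated objective: alternative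
-- what changed: A builds the grouping in one pass, appending each word to its count's list as it goes; B first computes the distinct counts in first-occurrence order with dict.fromkeys and then builds each group in one comprehension that filters the whole item list per count.
import Mathlib
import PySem

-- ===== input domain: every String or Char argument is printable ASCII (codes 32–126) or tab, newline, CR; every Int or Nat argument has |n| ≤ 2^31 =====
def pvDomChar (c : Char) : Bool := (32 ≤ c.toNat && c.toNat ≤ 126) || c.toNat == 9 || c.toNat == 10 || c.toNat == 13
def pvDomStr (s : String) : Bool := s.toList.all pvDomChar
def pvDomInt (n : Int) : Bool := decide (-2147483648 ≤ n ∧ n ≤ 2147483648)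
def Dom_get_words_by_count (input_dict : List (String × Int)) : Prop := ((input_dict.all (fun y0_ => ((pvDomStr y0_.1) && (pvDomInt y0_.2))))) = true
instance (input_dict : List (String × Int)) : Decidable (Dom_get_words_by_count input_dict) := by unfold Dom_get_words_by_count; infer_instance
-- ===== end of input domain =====

-- B replaces A's single-pass append-accumulation with "dedup the counts, then one filter per count" — an alternative decomposition of the same grouping.


-- ===== PORT A =====
def get_words_by_count (input_dict : List (String × Int)) : List (Int × List String) :=
  (input_dict.foldl
    (fun (r_dict : PySem.Dict Int (List String)) wn =>
      if r_dict.contains wn.2 then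
        r_dict.modify wn.2 [] (fun l => l ++ [wn.1])
      else
        r_dict.insert wn.2 [wn.1])
    PySem.Dict.empty).items

-- ===== PORT B =====
def get_words_by_count_alt (input_dict : List (String × Int)) : List (Int × List String) :=
  (PySem.List.dedup (input_dict.map (fun wn => wn.2))).map
    (fun num => (num, (input_dict.filter (fun wn => wn.2 == num)).map (fun wn => wn.1)))

-- ===== PRECONDITION & SPEC =====
def Spec_get_words_by_count (input_dict : List (String × Int)) (out : List (Int × List String)) : Prop := out = get_words_by_count_alt input_dict
instance (input_dict : List (String × Int)) (out : List (Int × List String)) : Decidable (Spec_get_words_by_count input_dict out) := by unfold Spec_get_words_by_count; infer_instance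

-- ===== CLAIM (what is proved, stated in full; the proofs are below) =====
def Claim_equal_get_words_by_count : Prop := ∀ (input_dict : List (String × Int)), Dom_get_words_by_count input_dict → Spec_get_words_by_count input_dict (get_words_by_count input_dict)

-- ===== LEMMAS AND PROOFS =====

-- Python's dict.fromkeys dedup of s ++ [x].
lemma dedup_append_singleton {α : Type} [BEq α] [LawfulBEq α] (s : List α) (x : α) :
    PySem.List.dedup (s ++ [x]) =
      if x ∈ s then PySem.List.dedup s else PySem.List.dedup s ++ [x] := by
  simp only [PySem.List.dedup, PySem.Set.ofList, List.foldl_append, List.foldl_cons,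
    List.foldl_nil, PySem.Set.add]
  have hmem : (List.foldl PySem.Set.add PySem.Set.empty s).contains x = decide (x ∈ s) := by
    have := PySem.Set.mem_ofList s x
    simp only [PySem.Set.ofList, PySem.Set.empty] at this
    by_cases h : x ∈ s <;> simp [this, h]
  rw [hmem]
  by_cases h : x ∈ s <;> simp [h]

-- The invariant of A's loop: the dict built from a prefix, as an items list, is B's value on that prefix.
lemma get_words_by_count_items (l : List (String × Int)) :
    (l.foldl
      (fun (r_dict : PySem.Dict Int (List String)) wn =>
        if r_dict.contains wn.2 then
          r_dict.modify wn.2 [] (fun l => l ++ [wn.1])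
        else
          r_dict.insert wn.2 [wn.1])
      PySem.Dict.empty).items =
    (PySem.List.dedup (l.map (fun wn => wn.2))).map
      (fun num => (num, (l.filter (fun wn => wn.2 == num)).map (fun wn => wn.1))) := by
  induction l using List.reverseRecOn with
  | nil => rfl
  | append_singleton xs p ih =>
    set g := fun (num : Int) => (num, (xs.filter (fun wn => wn.2 == num)).map (fun wn => wn.1)) with hg
    set S := xs.map (fun wn : String × Int => wn.2) with hS
    set D := xs.foldl
      (fun (r_dict : PySem.Dict Int (List String)) wn =>
        if r_dict.contains wn.2 then
          r_dict.modify wn.2 [] (fun l => l ++ [wn.1])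
        else
          r_dict.insert wn.2 [wn.1])
      PySem.Dict.empty with hD
    have hitems : D.items = (PySem.List.dedup S).map g := ih
    have hkeys : D.keys = PySem.List.dedup S := by
      simp only [PySem.Dict.keys, hitems, List.map_map, Function.comp_def]
      simp [hg]
    have hnodup : D.keys.Nodup := by
      rw [hkeys]; exact PySem.List.nodup_dedup S
    have hcont : D.contains p.2 = decide (p.2 ∈ S) := by
      simp only [PySem.Dict.contains, hitems, List.any_map, Function.comp_def]
      by_cases hm : p.2 ∈ S
      · simp [hg, PySem.Set.mem_ofList, hm]
      · simp only [hg]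
        simp [hm]
        exact fun x hx hEq => hm (hEq ▸ hx)
    rw [List.foldl_append, List.foldl_cons, List.foldl_nil, ← hD]
    rw [List.map_append, ← hS, List.map_cons, List.map_nil, dedup_append_singleton]
    by_cases h : p.2 ∈ S
    · -- existing count: the loop body appends to the stored list
      have hc : D.contains p.2 = true := by rw [hcont]; simp [h]
      have hmemi : (p.2, (xs.filter (fun wn => wn.2 == p.2)).map (fun wn => wn.1)) ∈ D.items := by
        rw [hitems]
        exact List.mem_map.mpr ⟨p.2, (PySem.List.mem_dedup S p.2).mpr h, rfl⟩
      have hget : D.getD p.2 [] = (xs.filter (fun wn => wn.2 == p.2)).map (fun wn => wn.1) :=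
        PySem.Dict.getD_of_mem_items D hmemi hnodup []
      rw [if_pos hc, if_pos h]
      simp only [PySem.Dict.modify, hget]
      rw [PySem.Dict.items_insert_of_contains D _ hc, hitems, List.map_map]
      apply List.map_congr_left
      intro n hn
      simp only [Function.comp, hg]
      by_cases hnp : n = p.2
      · subst hnp
        simp [List.filter_append]
      · simp [hnp, Ne.symm hnp, List.filter_append]
    · -- new count: the loop body inserts a fresh singleton group
      have hc : D.contains p.2 = false := by rw [hcont]; simp [h]
      have hfilxs : xs.filter (fun wn => wn.2 == p.2) = [] := by
        rw [List.filter_eq_nil_iff]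
        intro wn hwn
        have : wn.2 ∈ S := List.mem_map.mpr ⟨wn, hwn, rfl⟩
        simp only [beq_iff_eq]
        intro hEq; exact h (hEq ▸ this)
      rw [if_neg (by simp [hc]), if_neg h]
      rw [PySem.Dict.items_insert_of_not_contains D _ hc, hitems, List.map_append]
      congr 1
      · apply List.map_congr_left
        intro n hn
        have hnS : n ∈ S := (PySem.List.mem_dedup S n).mp hn
        have hnp : p.2 ≠ n := fun hEq => h (hEq ▸ hnS)
        simp [hg, List.filter_append, hnp]
      · simp [List.filter_append, hfilxs]

-- ===== VERDICT (by name: the statement is the Claim_ definition above) =====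
theorem get_words_by_count_spec : Claim_equal_get_words_by_count := by
  intro l _
  show _ = _
  unfold get_words_by_count get_words_by_count_alt
  exact get_words_by_count_items l
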